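-- pv_equiv track=rewrite | github.com/hjylha/krypto | krypto.py | do_two_words_match
-- ===== SOURCE A (Python) =====
-- def do_two_words_match(word1, word2, codeword1, codeword2):
--     for num1, char1 in zip(codeword1, word1):
--         for num2, char2 in zip(codeword2, word2):
--             if num1 == num2 and char1 != char2:
--                 return False
--             if num1 != num2 and char1 == char2:
--                 return False
--     return True
-- ===== SOURCE B (Python) =====
-- def do_two_words_match(word1, word2, codeword1, codeword2):
--     num_pos = {}
--     char_pos = {}
--     for i, (n2, c2) in enumerate(zip(codeword2, word2)):
--         num_pos.setdefault(n2, set()).add(i)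
--         char_pos.setdefault(c2, set()).add(i)
--     for n1, c1 in zip(codeword1, word1):
--         if num_pos.get(n1, set()) != char_pos.get(c1, set()):
--             return False
--     return True
-- ===== Notes on version B (the rewrite author's own statement) =====
-- stated objective: faster
-- what changed: Replaces the nested pairwise scan with one indexing pass over (codeword2, word2) building position tables per number and per character, then a single pass over (codeword1, word1) comparing the two position sets per element.
import Mathlib
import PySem

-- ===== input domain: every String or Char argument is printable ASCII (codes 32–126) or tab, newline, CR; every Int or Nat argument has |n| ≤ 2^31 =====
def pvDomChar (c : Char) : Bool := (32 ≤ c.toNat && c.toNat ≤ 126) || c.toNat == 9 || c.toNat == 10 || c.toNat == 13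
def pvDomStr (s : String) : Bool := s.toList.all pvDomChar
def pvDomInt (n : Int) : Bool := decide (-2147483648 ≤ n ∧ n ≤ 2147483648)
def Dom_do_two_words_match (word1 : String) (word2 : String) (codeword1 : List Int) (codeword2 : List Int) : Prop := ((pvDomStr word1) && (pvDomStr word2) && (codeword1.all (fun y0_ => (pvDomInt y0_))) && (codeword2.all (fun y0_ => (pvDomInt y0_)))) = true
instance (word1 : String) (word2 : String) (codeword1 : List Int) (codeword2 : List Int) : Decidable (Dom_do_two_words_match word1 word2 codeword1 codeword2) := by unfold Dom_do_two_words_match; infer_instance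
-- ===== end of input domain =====

-- B replaces A's nested pairwise scan by position tables built in one pass over (codeword2, word2),
-- then compares per-element position sets in one pass over (codeword1, word1) (objective: faster).


-- ===== PORT A =====
-- Early-return double loop ported as nested List.all; branches kept in A's order.
def do_two_words_match (word1 : String) (word2 : String) (codeword1 : List Int) (codeword2 : List Int) : Bool :=
  (codeword1.zip word1.toList).all (fun p1 =>
    (codeword2.zip word2.toList).all (fun p2 =>
      if p1.1 == p2.1 && !(p1.2 == p2.2) then false
      else if !(p1.1 == p2.1) && p1.2 == p2.2 then false
      else true))

-- ===== PORT B =====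
-- setdefault(k, set()).add(i) is Dict.modify k ∅ (·.add i)
def do_two_words_match_alt (word1 : String) (word2 : String) (codeword1 : List Int) (codeword2 : List Int) : Bool :=
  let pairs2 := codeword2.zip word2.toList
  let numPos : PySem.Dict Int (PySem.Set Int) :=
    (PySem.List.enumerate pairs2 0).foldl
      (fun d p => d.modify p.2.1 PySem.Set.empty (fun s => PySem.Set.add s p.1)) PySem.Dict.empty
  let charPos : PySem.Dict Char (PySem.Set Int) :=
    (PySem.List.enumerate pairs2 0).foldl
      (fun d p => d.modify p.2.2 PySem.Set.empty (fun s => PySem.Set.add s p.1)) PySem.Dict.empty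
  (codeword1.zip word1.toList).all (fun p1 =>
    PySem.Set.equal (numPos.getD p1.1 PySem.Set.empty) (charPos.getD p1.2 PySem.Set.empty))

-- ===== PRECONDITION & SPEC =====
def Spec_do_two_words_match (word1 : String) (word2 : String) (codeword1 : List Int) (codeword2 : List Int) (out : Bool) : Prop := out = do_two_words_match_alt word1 word2 codeword1 codeword2
instance (word1 : String) (word2 : String) (codeword1 : List Int) (codeword2 : List Int) (out : Bool) : Decidable (Spec_do_two_words_match word1 word2 codeword1 codeword2 out) := by unfold Spec_do_two_words_match; infer_instance

-- ===== CLAIM (what is proved, stated in full; the proofs are below) =====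
def Claim_equal_do_two_words_match : Prop := ∀ (word1 : String) (word2 : String) (codeword1 : List Int) (codeword2 : List Int), Dom_do_two_words_match word1 word2 codeword1 codeword2 → Spec_do_two_words_match word1 word2 codeword1 codeword2 (do_two_words_match word1 word2 codeword1 codeword2)

-- ===== LEMMAS AND PROOFS =====

-- membership in the position table built by the fold, generic in the key projection
theorem pv_mem_getD_fold {β κ : Type} [BEq κ] [LawfulBEq κ] [DecidableEq κ]
    (l : List (Int × β)) (key : β → κ) (d : PySem.Dict κ (PySem.Set Int)) (n : κ) (j : Int) :
    (j ∈ (l.foldl (fun d p => d.modify (key p.2) PySem.Set.empty (fun s => PySem.Set.add s p.1)) d).getD n PySem.Set.empty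
      ↔ j ∈ d.getD n PySem.Set.empty ∨ ∃ p ∈ l, key p.2 = n ∧ p.1 = j) := by
  induction l generalizing d with
  | nil => simp
  | cons p rest ih =>
    rw [List.foldl_cons, ih]
    simp only [List.mem_cons]
    by_cases h : n = key p.2
    · rw [h, PySem.Dict.getD_modify_self, PySem.Set.mem_add]
      constructor
      · rintro ((hj | rfl) | ⟨q, hq, hkq, hjq⟩)
        · exact Or.inl hj
        · exact Or.inr ⟨p, Or.inl rfl, rfl, rfl⟩
        · exact Or.inr ⟨q, Or.inr hq, hkq, hjq⟩
      · rintro (hj | ⟨q, (rfl | hq), hkq, hjq⟩)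
        · exact Or.inl (Or.inl hj)
        · exact Or.inl (Or.inr hjq.symm)
        · exact Or.inr ⟨q, hq, hkq, hjq⟩
    · rw [PySem.Dict.getD_modify, if_neg h]
      constructor
      · rintro (hj | ⟨q, hq, hkq, hjq⟩)
        · exact Or.inl hj
        · exact Or.inr ⟨q, Or.inr hq, hkq, hjq⟩
      · rintro (hj | ⟨q, (rfl | hq), hkq, hjq⟩)
        · exact Or.inl hj
        · exact absurd hkq.symm h
        · exact Or.inr ⟨q, hq, hkq, hjq⟩

-- membership in PySem.List.enumerate from 0 characterized by getElem?
theorem pv_mem_enumerate {α : Type} (xs : List α) (s : Int) (p : Int × α) :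
    p ∈ PySem.List.enumerate xs s ↔ ∃ k : Nat, xs[k]? = some p.2 ∧ p.1 = s + k := by
  induction xs generalizing s with
  | nil => simp [PySem.List.enumerate_nil]
  | cons x xs ih =>
    simp only [PySem.List.enumerate_cons, List.mem_cons, ih]
    constructor
    · rintro (rfl | ⟨k, hk, hp⟩)
      · exact ⟨0, by simp⟩
      · exact ⟨k + 1, by simpa using hk, by omega⟩
    · rintro ⟨k, hk, hp⟩
      cases k with
      | zero =>
        left
        simp at hk
        have : p = (s, p.2) := by
          cases p; simp at hp ⊢; omega
        rw [this, hk]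
      | succ k =>
        right
        exact ⟨k, by simpa using hk, by push_cast at hp ⊢; omega⟩

-- key per-element lemma: set-of-positions equality = inner all of A
theorem pv_key (pairs2 : List (Int × Char)) (n1 : Int) (c1 : Char) :
    PySem.Set.equal
      (((PySem.List.enumerate pairs2 0).foldl
        (fun d p => d.modify p.2.1 PySem.Set.empty (fun s => PySem.Set.add s p.1)) PySem.Dict.empty).getD n1 PySem.Set.empty)
      (((PySem.List.enumerate pairs2 0).foldl
        (fun d p => d.modify p.2.2 PySem.Set.empty (fun s => PySem.Set.add s p.1)) PySem.Dict.empty).getD c1 PySem.Set.empty)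
    = pairs2.all (fun p2 =>
      if n1 == p2.1 && !(c1 == p2.2) then false
      else if !(n1 == p2.1) && c1 == p2.2 then false
      else true) := by
  apply Bool.eq_iff_iff.mpr
  rw [PySem.Set.equal_iff, List.all_eq_true]
  have hS1 : ∀ j : Int, j ∈ ((PySem.List.enumerate pairs2 0).foldl
      (fun d p => d.modify p.2.1 PySem.Set.empty (fun s => PySem.Set.add s p.1)) PySem.Dict.empty).getD n1 PySem.Set.empty
      ↔ ∃ p ∈ PySem.List.enumerate pairs2 0, p.2.1 = n1 ∧ p.1 = j := by
    intro j
    rw [pv_mem_getD_fold]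
    simp [PySem.Dict.getD_empty]
  have hS2 : ∀ j : Int, j ∈ ((PySem.List.enumerate pairs2 0).foldl
      (fun d p => d.modify p.2.2 PySem.Set.empty (fun s => PySem.Set.add s p.1)) PySem.Dict.empty).getD c1 PySem.Set.empty
      ↔ ∃ p ∈ PySem.List.enumerate pairs2 0, p.2.2 = c1 ∧ p.1 = j := by
    intro j
    rw [pv_mem_getD_fold]
    simp [PySem.Dict.getD_empty]
  constructor
  · intro h p2 hp2
    obtain ⟨k, hk⟩ := List.mem_iff_getElem?.mp hp2
    have he : ((k : Int), p2) ∈ PySem.List.enumerate pairs2 0 :=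
      (pv_mem_enumerate pairs2 0 _).mpr ⟨k, by simpa using hk, by simp⟩
    by_cases hn : n1 = p2.1
    · have hs1 : ((k : Int)) ∈ ((PySem.List.enumerate pairs2 0).foldl
          (fun d p => d.modify p.2.1 PySem.Set.empty (fun s => PySem.Set.add s p.1)) PySem.Dict.empty).getD n1 PySem.Set.empty :=
        (hS1 _).mpr ⟨((k : Int), p2), he, hn.symm, rfl⟩
      obtain ⟨q, hq, hqc, hqj⟩ := (hS2 _).mp ((h _).mp hs1)
      obtain ⟨k', hk', hqi⟩ := (pv_mem_enumerate pairs2 0 q).mp hq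
      have hkk : k' = k := by omega
      subst hkk
      rw [hk] at hk'
      have hq2 : q.2 = p2 := by injection hk' with hx; exact hx.symm
      rw [hq2] at hqc
      simp [hn, hqc]
    · by_cases hc : c1 = p2.2
      · have hs2 : ((k : Int)) ∈ ((PySem.List.enumerate pairs2 0).foldl
            (fun d p => d.modify p.2.2 PySem.Set.empty (fun s => PySem.Set.add s p.1)) PySem.Dict.empty).getD c1 PySem.Set.empty :=
          (hS2 _).mpr ⟨((k : Int), p2), he, hc.symm, rfl⟩
        obtain ⟨q, hq, hqn, hqj⟩ := (hS1 _).mp ((h _).mpr hs2)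
        obtain ⟨k', hk', hqi⟩ := (pv_mem_enumerate pairs2 0 q).mp hq
        have hkk : k' = k := by omega
        subst hkk
        rw [hk] at hk'
        have hq2 : q.2 = p2 := by injection hk' with hx; exact hx.symm
        rw [hq2] at hqn
        exact absurd hqn.symm hn
      · simp [hn, hc]
  · intro h j
    rw [hS1, hS2]
    constructor
    · rintro ⟨q, hq, hqn, hqj⟩
      obtain ⟨k, hk, hqi⟩ := (pv_mem_enumerate pairs2 0 q).mp hq
      have hthis := h q.2 (List.mem_of_getElem? hk)
      by_cases hc : c1 = q.2.2
      · exact ⟨q, hq, hc.symm, hqj⟩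
      · simp [hqn, hc] at hthis
    · rintro ⟨q, hq, hqc, hqj⟩
      obtain ⟨k, hk, hqi⟩ := (pv_mem_enumerate pairs2 0 q).mp hq
      have hthis := h q.2 (List.mem_of_getElem? hk)
      by_cases hn : n1 = q.2.1
      · exact ⟨q, hq, hn.symm, hqj⟩
      · simp [hn, hqc] at hthis

-- ===== VERDICT (by name: the statement is the Claim_ definition above) =====
theorem do_two_words_match_spec : Claim_equal_do_two_words_match := by
  intro word1 word2 codeword1 codeword2 _
  unfold Spec_do_two_words_match do_two_words_match do_two_words_match_alt
  simp only
  congr 1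
  funext p1
  exact (pv_key (codeword2.zip word2.toList) p1.1 p1.2).symm
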